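-- pv_equiv track=rewrite | github.com/faltamiranod93/sat_platform | src/satplatform/config.py | _iter_placeholders
-- ===== SOURCE A (Python) =====
-- def _iter_placeholders(fmt: str):
--     # Busca {name} muy simple; evita formatear para no explotar
--     start = 0
--     while True:
--         i = fmt.find("{", start)
--         if i == -1:
--             break
--         j = fmt.find("}", i + 1)
--         if j == -1:
--             break
--         name = fmt[i + 1 : j].strip()
--         if name:
--             yield (i, name)
--         start = j + 1
-- ===== SOURCE B (Python) =====
-- def _iter_placeholders(fmt: str):
--     # Single left-to-right character scan keeping the index of the currently
--     # open "{" as state, instead of repeated find() calls with manual restarts.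
--     open_i = None
--     for k, c in enumerate(fmt):
--         if open_i is None:
--             if c == "{":
--                 open_i = k
--         elif c == "}":
--             name = fmt[open_i + 1 : k].strip()
--             if name:
--                 yield (open_i, name)
--             open_i = None
-- ===== Notes on version B (the rewrite author's own statement) =====
-- stated objective: alternative
-- what changed: Replaced the repeated find-open-brace/find-close-brace calls with manual restart indices by a single left-to-right character scan (enumerate) that keeps the index of the currently open brace as state and emits a placeholder at each closing brace.
import Mathlib
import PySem

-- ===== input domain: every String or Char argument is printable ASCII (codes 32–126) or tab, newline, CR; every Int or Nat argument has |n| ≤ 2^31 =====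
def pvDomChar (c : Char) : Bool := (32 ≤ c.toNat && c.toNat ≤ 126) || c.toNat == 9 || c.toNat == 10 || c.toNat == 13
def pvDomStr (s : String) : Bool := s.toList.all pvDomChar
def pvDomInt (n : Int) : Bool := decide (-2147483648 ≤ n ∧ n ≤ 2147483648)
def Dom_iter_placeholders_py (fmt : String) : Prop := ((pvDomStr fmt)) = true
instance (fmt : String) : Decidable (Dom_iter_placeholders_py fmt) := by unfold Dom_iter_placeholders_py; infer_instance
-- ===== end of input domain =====

-- B replaces A's repeated find()-with-restart loop by a single character scan with an
-- open-brace state; same return values (objective: alternative, no speed claim).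

-- ===== PORT A =====
-- A's while-loop: find an opening brace from start, find a closing brace after it,
-- slice+strip, restart past the closing brace.
-- fuel only makes the recursion total (start grows by ≥ 2 each round, so length+1 is enough).
def pvAGo (cs : List Char) (fuel : Nat) (start : Int) : List (Int × String) :=
  match fuel with
  | 0 => []
  | fuel + 1 =>
    let i := PySem.Chars.findFrom cs ['{'] start none
    if i = -1 then []
    else
      let j := PySem.Chars.findFrom cs ['}'] (i + 1) none
      if j = -1 then []
      else
        let name := PySem.Chars.strip (PySem.List.slice cs (some (i + 1)) (some j))
        (if name ≠ [] then [(i, String.ofList name)] else []) ++ pvAGo cs fuel (j + 1)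

def iter_placeholders_py (fmt : String) : List (Int × String) :=
  pvAGo fmt.toList (fmt.toList.length + 1) 0

-- ===== PORT B =====
-- B's for-loop over enumerate(fmt) with state open_i : Option Int, as structural recursion.
def pvBScan (full : List Char) (cs : List Char) (k : Int) (openi : Option Int) :
    List (Int × String) :=
  match cs with
  | [] => []
  | c :: rest =>
    match openi with
    | none => if c = '{' then pvBScan full rest (k + 1) (some k) else pvBScan full rest (k + 1) none
    | some i =>
      if c = '}' then
        let name := PySem.Chars.strip (PySem.List.slice full (some (i + 1)) (some k))
        (if name ≠ [] then [(i, String.ofList name)] else []) ++ pvBScan full rest (k + 1) none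
      else pvBScan full rest (k + 1) (some i)

def iter_placeholders_py_alt (fmt : String) : List (Int × String) :=
  pvBScan fmt.toList fmt.toList 0 none

-- ===== PRECONDITION & SPEC =====
def Spec_iter_placeholders_py (fmt : String) (out : List (Int × String)) : Prop := out = iter_placeholders_py_alt fmt
instance (fmt : String) (out : List (Int × String)) : Decidable (Spec_iter_placeholders_py fmt out) := by unfold Spec_iter_placeholders_py; infer_instance

-- ===== CLAIM (what is proved, stated in full; the proofs are below) =====
def Claim_equal_iter_placeholders_py : Prop := ∀ (fmt : String), Dom_iter_placeholders_py fmt → Spec_iter_placeholders_py fmt (iter_placeholders_py fmt)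

-- ===== LEMMAS AND PROOFS =====

theorem pv_singleton_prefix_iff {a : Char} {l : List Char} : [a] <+: l ↔ l.head? = some a := by
  cases l with
  | nil => simp
  | cons b t => simp [List.cons_prefix_iff]

-- in state none, a segment without an opening brace is skipped
theorem pvBScan_skip_none (full seg rest : List Char) (k : Int)
    (h : '{' ∉ seg) :
    pvBScan full (seg ++ rest) k none = pvBScan full rest (k + seg.length) none := by
  induction seg generalizing k with
  | nil => simp
  | cons c t ih =>
    simp only [List.mem_cons, not_or] at h
    simp only [List.cons_append, pvBScan, if_neg (Ne.symm h.1)]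
    rw [ih _ h.2]
    congr 1
    push_cast [List.length_cons]; omega

-- in state (some i), a segment without a closing brace is skipped
theorem pvBScan_skip_some (full seg rest : List Char) (k i : Int)
    (h : '}' ∉ seg) :
    pvBScan full (seg ++ rest) k (some i) = pvBScan full rest (k + seg.length) (some i) := by
  induction seg generalizing k with
  | nil => simp
  | cons c t ih =>
    simp only [List.mem_cons, not_or] at h
    simp only [List.cons_append, pvBScan, if_neg (Ne.symm h.1)]
    rw [ih _ h.2]
    congr 1
    push_cast [List.length_cons]; omega

theorem pvBScan_none_nil (full seg : List Char) (k : Int) (h : '{' ∉ seg) :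
    pvBScan full seg k none = [] := by
  have := pvBScan_skip_none full seg [] k h
  simpa using this

theorem pvBScan_some_nil (full seg : List Char) (k i : Int) (h : '}' ∉ seg) :
    pvBScan full seg k (some i) = [] := by
  have := pvBScan_skip_some full seg [] k i h
  simpa using this

theorem pv_main (cs : List Char) (fuel k : Nat) (hk : k ≤ cs.length)
    (hfuel : cs.length + 1 - k ≤ fuel) :
    pvAGo cs fuel (k : Int) = pvBScan cs (cs.drop k) (k : Int) none := by
  induction fuel generalizing k with
  | zero => omega
  | succ fuel ih =>
    simp only [pvAGo]
    by_cases hi : PySem.Chars.findFrom cs ['{'] (k : Int) none = -1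
    · -- no opening brace in cs.drop k : both sides empty
      rw [if_pos hi]
      have hno : ¬ ['{'] <:+: cs.drop k :=
        (PySem.Chars.findFrom_natCast_eq_neg_one_iff cs ['{'] k hk).mp hi
      have hmem : '{' ∉ cs.drop k := fun hm => by
        obtain ⟨s, t, ht⟩ := List.mem_iff_append.mp hm
        exact hno ⟨s, t, by simpa using ht.symm⟩
      exact (pvBScan_none_nil cs (cs.drop k) (k : Int) hmem).symm
    · -- an opening brace was found at position iN
      obtain ⟨hki, hpre, hmin⟩ := PySem.Chars.findFrom_natCast_spec cs ['{'] k hk hi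
      set i := PySem.Chars.findFrom cs ['{'] (k : Int) none with hidef
      have hi0 : (0:Int) ≤ i := le_trans (by positivity) hki
      set iN := i.toNat with hiN
      have hicast : i = (iN : Int) := (Int.toNat_of_nonneg hi0).symm
      have hkiN : k ≤ iN := by omega
      have hiNlt : iN < cs.length := by
        by_contra hge
        rw [List.drop_eq_nil_of_le (by omega)] at hpre
        simp at hpre
      have hdropi : cs.drop iN = '{' :: cs.drop (iN + 1) := by
        have h1 := List.drop_eq_getElem_cons hiNlt
        have h2 : cs[iN]? = some '{' := by
          simpa using pv_singleton_prefix_iff.mp hpre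
        obtain ⟨_, h2'⟩ := List.getElem?_eq_some_iff.mp h2
        rw [h1, h2']
      -- split cs.drop k
      have hsplit : (cs.drop k).take (iN - k) ++ cs.drop iN = cs.drop k := by
        have : cs.drop iN = (cs.drop k).drop (iN - k) := by
          rw [List.drop_drop]; congr 1; omega
        rw [this, List.take_append_drop]
      have hseglen : ((cs.drop k).take (iN - k)).length = iN - k := by
        simp [List.length_take, List.length_drop]; omega
      have hsegno : '{' ∉ (cs.drop k).take (iN - k) := by
        intro hm
        obtain ⟨m, hmlt, hmeq⟩ := List.mem_iff_getElem.mp hm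
        rw [hseglen] at hmlt
        have hmget : cs[k + m]'(by omega) = '{' := by
          rw [← hmeq, List.getElem_take, List.getElem_drop]
        refine hmin (k + m) (by omega) (by omega) ?_
        rw [List.drop_eq_getElem_cons (l := cs) (by omega), hmget]
        exact ⟨_, rfl⟩
      have hB1 : pvBScan cs (cs.drop k) (k : Int) none
          = pvBScan cs (cs.drop (iN + 1)) ((iN : Int) + 1) (some (iN : Int)) := by
        rw [← hsplit, pvBScan_skip_none cs _ _ _ hsegno, hdropi]
        have hkl : (k : Int) + ((cs.drop k).take (iN - k)).length = (iN : Int) := by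
          rw [hseglen]; omega
        rw [hkl]
        simp [pvBScan]
      rw [if_neg hi, hB1]
      -- now the closing-brace search
      by_cases hj : PySem.Chars.findFrom cs ['}'] (i + 1) none = -1
      · rw [if_pos hj]
        have hno : ¬ ['}'] <:+: cs.drop (iN + 1) := by
          have := (PySem.Chars.findFrom_natCast_eq_neg_one_iff cs ['}'] (iN+1) (by omega)).mp
            (by rw [← hj]; congr 1; push_cast [hicast]; ring)
          simpa using this
        have hmem : '}' ∉ cs.drop (iN + 1) := fun hm => by
          obtain ⟨s, t, ht⟩ := List.mem_iff_append.mp hm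
          exact hno ⟨s, t, by simpa using ht.symm⟩
        exact (pvBScan_some_nil cs _ _ _ hmem).symm
      · have hjrw : PySem.Chars.findFrom cs ['}'] (i + 1) none
            = PySem.Chars.findFrom cs ['}'] ((iN + 1 : Nat) : Int) none := by
          congr 1; push_cast [hicast]; ring
        have hj' : PySem.Chars.findFrom cs ['}'] ((iN + 1 : Nat) : Int) none ≠ -1 := by
          rw [← hjrw]; exact hj
        obtain ⟨hkj, hprej, hminj⟩ :=
          PySem.Chars.findFrom_natCast_spec cs ['}'] (iN + 1) (by omega) hj'
        set j := PySem.Chars.findFrom cs ['}'] ((iN + 1 : Nat) : Int) none with hjdef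
        have hj0 : (0:Int) ≤ j := le_trans (by positivity) hkj
        set jN := j.toNat with hjN
        have hjcast : j = (jN : Int) := (Int.toNat_of_nonneg hj0).symm
        have hijN : iN + 1 ≤ jN := by omega
        have hjNlt : jN < cs.length := by
          by_contra hge
          rw [List.drop_eq_nil_of_le (by omega)] at hprej
          simp at hprej
        have hdropj : cs.drop jN = '}' :: cs.drop (jN + 1) := by
          have h1 := List.drop_eq_getElem_cons hjNlt
          have h2 : cs[jN]? = some '}' := by
            simpa using pv_singleton_prefix_iff.mp hprej
          obtain ⟨_, h2'⟩ := List.getElem?_eq_some_iff.mp h2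
          rw [h1, h2']
        have hsplit2 : (cs.drop (iN+1)).take (jN - (iN+1)) ++ cs.drop jN = cs.drop (iN+1) := by
          have : cs.drop jN = (cs.drop (iN+1)).drop (jN - (iN+1)) := by
            rw [List.drop_drop]; congr 1; omega
          rw [this, List.take_append_drop]
        have hseglen2 : ((cs.drop (iN+1)).take (jN - (iN+1))).length = jN - (iN+1) := by
          simp [List.length_take, List.length_drop]; omega
        have hsegno2 : '}' ∉ (cs.drop (iN+1)).take (jN - (iN+1)) := by
          intro hm
          obtain ⟨m, hmlt, hmeq⟩ := List.mem_iff_getElem.mp hm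
          rw [hseglen2] at hmlt
          have hmget : cs[(iN+1) + m]'(by omega) = '}' := by
            rw [← hmeq, List.getElem_take, List.getElem_drop]
          refine hminj ((iN+1) + m) (by omega) (by omega) ?_
          rw [List.drop_eq_getElem_cons (l := cs) (by omega), hmget]
          exact ⟨_, rfl⟩
        have hB2 : pvBScan cs (cs.drop (iN + 1)) ((iN : Int) + 1) (some (iN : Int))
            = (if PySem.Chars.strip (PySem.List.slice cs (some ((iN:Int) + 1)) (some (jN:Int))) ≠ []
                then [((iN:Int), String.ofList (PySem.Chars.strip (PySem.List.slice cs (some ((iN:Int) + 1)) (some (jN:Int)))))]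
                else [])
              ++ pvBScan cs (cs.drop (jN + 1)) ((jN : Int) + 1) none := by
          rw [← hsplit2, pvBScan_skip_some cs _ _ _ _ hsegno2, hdropj]
          have hkl : ((iN : Int) + 1) + ((cs.drop (iN+1)).take (jN - (iN+1))).length = (jN : Int) := by
            rw [hseglen2]; omega
          rw [hkl]
          simp [pvBScan]
        rw [if_neg hj, hB2, hjrw, hicast, hjcast]
        have hcast1 : ((jN : Int) + 1) = ((jN + 1 : Nat) : Int) := by push_cast; ring
        rw [hcast1, ih (jN + 1) (by omega) (by omega)]

theorem pv_spec_aux (fmt : String) :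
    iter_placeholders_py fmt = iter_placeholders_py_alt fmt := by
  unfold iter_placeholders_py iter_placeholders_py_alt
  have := pv_main fmt.toList (fmt.toList.length + 1) 0 (by omega) (by omega)
  simpa using this

-- ===== VERDICT (by name: the statement is the Claim_ definition above) =====
theorem iter_placeholders_py_spec : Claim_equal_iter_placeholders_py := by
  intro fmt _
  unfold Spec_iter_placeholders_py
  exact pv_spec_aux fmt
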